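-- pv_equiv track=rewrite | github.com/sb98052/tones | tones6.py | adjust_octave
-- ===== SOURCE A (Python) =====
-- min_octave = 3
--
-- max_octave = 5
--
-- note_semitones = {
--     'C': 0,
--     'C#': 1,
--     'Db': 1,
--     'D': 2,
--     'D#': 3,
--     'Eb': 3,
--     'E': 4,
--     'Fb': 4,
--     'E#': 5,
--     'F': 5,
--     'F#': 6,
--     'Gb': 6,
--     'G': 7,
--     'G#': 8,
--     'Ab': 8,
--     'A': 9,
--     'A#': 10,
--     'Bb': 10,
--     'B': 11,
--     'Cb': 11,
-- }
--
-- def adjust_octave(prev_note, prev_octave, next_note, next_octave, direction):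
--     prev_abs_pitch = prev_octave * 12 + note_semitones[prev_note]
--     next_abs_pitch = next_octave * 12 + note_semitones[next_note]
--
--     if direction == 'ascending':
--         while next_abs_pitch <= prev_abs_pitch and next_octave < max_octave:
--             next_octave += 1
--             next_abs_pitch = next_octave * 12 + note_semitones[next_note]
--     elif direction == 'descending':
--         while next_abs_pitch >= prev_abs_pitch and next_octave > min_octave:
--             next_octave -= 1
--             next_abs_pitch = next_octave * 12 + note_semitones[next_note]
--     return next_octave
-- ===== SOURCE B (Python) =====
-- min_octave = 3
--
-- max_octave = 5
--
-- note_semitones = {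
--     'C': 0, 'C#': 1, 'Db': 1, 'D': 2, 'D#': 3, 'Eb': 3, 'E': 4, 'Fb': 4,
--     'E#': 5, 'F': 5, 'F#': 6, 'Gb': 6, 'G': 7, 'G#': 8, 'Ab': 8, 'A': 9,
--     'A#': 10, 'Bb': 10, 'B': 11, 'Cb': 11,
-- }
--
-- def adjust_octave(prev_note, prev_octave, next_note, next_octave, direction):
--     # Closed form: no loop. The octave is derived arithmetically and clamped.
--     prev_abs_pitch = prev_octave * 12 + note_semitones[prev_note]
--     sem = note_semitones[next_note]
--     if direction == 'ascending':
--         # smallest octave whose pitch is strictly above prev_abs_pitch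
--         needed = (prev_abs_pitch - sem) // 12 + 1
--         return max(next_octave, min(max_octave, needed))
--     if direction == 'descending':
--         # largest octave whose pitch is strictly below prev_abs_pitch
--         needed = (prev_abs_pitch - sem - 1) // 12
--         return min(next_octave, max(min_octave, needed))
--     return next_octave
-- ===== Notes on version B (the rewrite author's own statement) =====
-- stated objective: simpler
-- what changed: Replaces the octave-shifting while loops with a closed-form floor-division formula clamped by max/min (no loop at all).
import Mathlib
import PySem

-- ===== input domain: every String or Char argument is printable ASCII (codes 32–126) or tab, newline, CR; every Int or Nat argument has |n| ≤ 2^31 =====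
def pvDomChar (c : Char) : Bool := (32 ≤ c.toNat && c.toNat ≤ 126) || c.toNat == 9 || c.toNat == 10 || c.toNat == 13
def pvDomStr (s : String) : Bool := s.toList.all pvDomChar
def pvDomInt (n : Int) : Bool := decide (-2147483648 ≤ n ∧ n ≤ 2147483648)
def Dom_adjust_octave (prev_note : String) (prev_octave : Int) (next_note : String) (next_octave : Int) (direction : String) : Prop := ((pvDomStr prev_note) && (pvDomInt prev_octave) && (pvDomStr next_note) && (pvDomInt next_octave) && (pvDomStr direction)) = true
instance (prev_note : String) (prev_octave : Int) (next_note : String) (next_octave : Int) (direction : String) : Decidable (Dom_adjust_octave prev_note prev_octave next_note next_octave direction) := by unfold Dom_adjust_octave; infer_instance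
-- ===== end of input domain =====

-- B replaces A's while loops by a closed-form clamped floor-division formula (objective: simpler).

-- ===== PORT A =====
def noteSemitones : PySem.Dict String Int := PySem.Dict.ofList
  [("C", 0), ("C#", 1), ("Db", 1), ("D", 2), ("D#", 3), ("Eb", 3), ("E", 4), ("Fb", 4),
   ("E#", 5), ("F", 5), ("F#", 6), ("Gb", 6), ("G", 7), ("G#", 8), ("Ab", 8), ("A", 9),
   ("A#", 10), ("Bb", 10), ("B", 11), ("Cb", 11)]

-- A's ascending while loop (default 0 on a missing key is unreachable under Pre_)
def loopAsc (prev_abs sem : Int) (oct : Int) : Int :=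
  if oct * 12 + sem ≤ prev_abs ∧ oct < 5 then loopAsc prev_abs sem (oct + 1) else oct
termination_by (5 - oct).toNat
decreasing_by omega

-- A's descending while loop
def loopDesc (prev_abs sem : Int) (oct : Int) : Int :=
  if prev_abs ≤ oct * 12 + sem ∧ 3 < oct then loopDesc prev_abs sem (oct - 1) else oct
termination_by (oct - 3).toNat
decreasing_by omega

def adjust_octave (prev_note : String) (prev_octave : Int) (next_note : String) (next_octave : Int) (direction : String) : Int :=
  let prev_abs_pitch := prev_octave * 12 + noteSemitones.getD prev_note 0
  let sem := noteSemitones.getD next_note 0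
  if direction = "ascending" then loopAsc prev_abs_pitch sem next_octave
  else if direction = "descending" then loopDesc prev_abs_pitch sem next_octave
  else next_octave

-- ===== PORT B =====
def adjust_octave_alt (prev_note : String) (prev_octave : Int) (next_note : String) (next_octave : Int) (direction : String) : Int :=
  let prev_abs_pitch := prev_octave * 12 + noteSemitones.getD prev_note 0
  let sem := noteSemitones.getD next_note 0
  if direction = "ascending" then
    max next_octave (min 5 (PySem.Int.floordiv (prev_abs_pitch - sem) 12 + 1))
  else if direction = "descending" then
    min next_octave (max 3 (PySem.Int.floordiv (prev_abs_pitch - sem - 1) 12))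
  else next_octave

-- ===== PRECONDITION & SPEC =====
-- Pre_ excludes exactly the inputs where Python A raises KeyError: a note name not in note_semitones.
def Pre_adjust_octave (prev_note : String) (_prev_octave : Int) (next_note : String) (_next_octave : Int) (_direction : String) : Prop :=
  noteSemitones.contains prev_note = true ∧ noteSemitones.contains next_note = true
instance (prev_note : String) (prev_octave : Int) (next_note : String) (next_octave : Int) (direction : String) : Decidable (Pre_adjust_octave prev_note prev_octave next_note next_octave direction) := by unfold Pre_adjust_octave; infer_instance

def pvWitness_adjust_octave : String × Int × String × Int × String := ("C", 4, "D", 4, "ascending")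

def Spec_adjust_octave (prev_note : String) (prev_octave : Int) (next_note : String) (next_octave : Int) (direction : String) (out : Int) : Prop := out = adjust_octave_alt prev_note prev_octave next_note next_octave direction
instance (prev_note : String) (prev_octave : Int) (next_note : String) (next_octave : Int) (direction : String) (out : Int) : Decidable (Spec_adjust_octave prev_note prev_octave next_note next_octave direction out) := by unfold Spec_adjust_octave; infer_instance

-- ===== CLAIM (what is proved, stated in full; the proofs are below) =====
def Claim_equal_adjust_octave : Prop := ∀ (prev_note : String) (prev_octave : Int) (next_note : String) (next_octave : Int) (direction : String), Dom_adjust_octave prev_note prev_octave next_note next_octave direction → Pre_adjust_octave prev_note prev_octave next_note next_octave direction → Spec_adjust_octave prev_note prev_octave next_note next_octave direction (adjust_octave prev_note prev_octave next_note next_octave direction)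

-- ===== LEMMAS AND PROOFS =====

theorem loopAsc_closed (p s : Int) (o : Int) :
    loopAsc p s o = max o (min 5 (PySem.Int.floordiv (p - s) 12 + 1)) := by
  fun_induction loopAsc p s o with
  | case1 o h ih =>
    rw [ih]
    have hq := Int.mul_fdiv_add_fmod (p - s) 12
    have hm1 : 0 ≤ (p - s).fmod 12 := Int.fmod_nonneg_of_pos _ (by norm_num)
    have hm2 : (p - s).fmod 12 < 12 := Int.fmod_lt_of_pos _ (by norm_num)
    simp only [PySem.Int.floordiv]
    omega
  | case2 o h =>
    have hq := Int.mul_fdiv_add_fmod (p - s) 12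
    have hm1 : 0 ≤ (p - s).fmod 12 := Int.fmod_nonneg_of_pos _ (by norm_num)
    have hm2 : (p - s).fmod 12 < 12 := Int.fmod_lt_of_pos _ (by norm_num)
    simp only [PySem.Int.floordiv]
    omega

theorem loopDesc_closed (p s : Int) (o : Int) :
    loopDesc p s o = min o (max 3 (PySem.Int.floordiv (p - s - 1) 12)) := by
  fun_induction loopDesc p s o with
  | case1 o h ih =>
    rw [ih]
    have hq := Int.mul_fdiv_add_fmod (p - s - 1) 12
    have hm1 : 0 ≤ (p - s - 1).fmod 12 := Int.fmod_nonneg_of_pos _ (by norm_num)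
    have hm2 : (p - s - 1).fmod 12 < 12 := Int.fmod_lt_of_pos _ (by norm_num)
    simp only [PySem.Int.floordiv]
    omega
  | case2 o h =>
    have hq := Int.mul_fdiv_add_fmod (p - s - 1) 12
    have hm1 : 0 ≤ (p - s - 1).fmod 12 := Int.fmod_nonneg_of_pos _ (by norm_num)
    have hm2 : (p - s - 1).fmod 12 < 12 := Int.fmod_lt_of_pos _ (by norm_num)
    simp only [PySem.Int.floordiv]
    omega

-- ===== VERDICT (by name: the statement is the Claim_ definition above) =====
theorem adjust_octave_spec : Claim_equal_adjust_octave := by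
  intro pn po nn no d _ _
  unfold Spec_adjust_octave adjust_octave adjust_octave_alt
  split_ifs <;> simp [loopAsc_closed, loopDesc_closed]
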